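-- pv_equiv track=rewrite | github.com/quantrpeter/pysh | pysh/commands/ls.py | _format_mode
-- ===== SOURCE A (Python) =====
-- import stat
--
-- def _format_mode(mode: int) -> str:
--     """Format file mode bits as rwxrwxrwx string."""
--     ftypes = {
--         stat.S_IFREG: '-', stat.S_IFDIR: 'd', stat.S_IFLNK: 'l',
--         stat.S_IFBLK: 'b', stat.S_IFCHR: 'c', stat.S_IFIFO: 'p',
--         stat.S_IFSOCK: 's',
--     }
--     ft = stat.S_IFMT(mode)
--     result = [ftypes.get(ft, '?')]
--
--     for shift, xbit, xchar in [
--         (6, stat.S_ISUID, 's'),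
--         (3, stat.S_ISGID, 's'),
--         (0, stat.S_ISVTX, 't'),
--     ]:
--         r = 'r' if mode & (stat.S_IRUSR >> (6 - shift)) else '-'
--         w = 'w' if mode & (stat.S_IWUSR >> (6 - shift)) else '-'
--         x_val = mode & (stat.S_IXUSR >> (6 - shift))
--         special = mode & xbit
--         if special and x_val:
--             x = xchar
--         elif special:
--             x = xchar.upper()
--         elif x_val:
--             x = 'x'
--         else:
--             x = '-'
--         result.extend([r, w, x])
--
--     return ''.join(result)
-- ===== SOURCE B (Python) =====
-- # stat-module constants, inlined (POSIX values, identical to the stat module's)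
-- _S_IFMT = 0o170000
-- _FTYPES = {
--     0o100000: '-', 0o040000: 'd', 0o120000: 'l',
--     0o060000: 'b', 0o020000: 'c', 0o010000: 'p',
--     0o140000: 's',
-- }
-- _PERM_TABLE = [
--     (0o400, 'r'), (0o200, 'w'), (0o100, 'x'),
--     (0o040, 'r'), (0o020, 'w'), (0o010, 'x'),
--     (0o004, 'r'), (0o002, 'w'), (0o001, 'x'),
-- ]
-- _SPECIALS = [(0o4000, 's'), (0o2000, 's'), (0o1000, 't')]
--
--
-- def _format_mode(mode: int) -> str:
--     """Format file mode bits as rwxrwxrwx string."""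
--     perm = [c if mode & m else '-' for m, c in _PERM_TABLE]
--     for i, (bit, ch) in enumerate(_SPECIALS):
--         if mode & bit:
--             perm[3 * i + 2] = ch if perm[3 * i + 2] == 'x' else ch.upper()
--     return _FTYPES.get(mode & _S_IFMT, '?') + ''.join(perm)
-- ===== Notes on version B (the rewrite author's own statement) =====
-- stated objective: simpler
-- what changed: Replaces A's triad loop with shifted masks and a four-way special-bit branch chain by a flat nine-entry (mask,char) table comprehension plus one patch pass that rewrites the three exec positions for set special bits.
import Mathlib
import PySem

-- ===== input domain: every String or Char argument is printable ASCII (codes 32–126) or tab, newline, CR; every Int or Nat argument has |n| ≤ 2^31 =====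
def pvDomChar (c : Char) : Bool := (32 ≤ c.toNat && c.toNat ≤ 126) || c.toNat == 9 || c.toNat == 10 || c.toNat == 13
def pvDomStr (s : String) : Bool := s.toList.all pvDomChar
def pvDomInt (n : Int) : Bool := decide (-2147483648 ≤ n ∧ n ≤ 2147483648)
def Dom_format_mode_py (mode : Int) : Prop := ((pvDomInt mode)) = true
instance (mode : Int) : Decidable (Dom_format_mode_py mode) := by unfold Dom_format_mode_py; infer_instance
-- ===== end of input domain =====

-- B replaces the triad loop/branch chain by a flat table comprehension plus a special-bit patch pass (objective: simpler); return-value equivalence on mode ≥ 0.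

-- ===== PORT A =====
def pvFtypes : PySem.Dict Int Char :=
  PySem.Dict.ofList [((32768:Int), '-'), (16384, 'd'), (40960, 'l'), (24576, 'b'), (8192, 'c'), (4096, 'p'), (49152, 's')]

def format_mode_py (mode : Int) : String :=
  let ft := PySem.Int.band mode 61440
  let result : List Char := [PySem.Dict.getD pvFtypes ft '?']
  let result := [((6 : Nat), (2048 : Int), 's'), (3, 1024, 's'), (0, 512, 't')].foldl
    (fun acc t =>
      let r : Char := if PySem.Int.band mode ((256 : Int) >>> ((6 - t.1 : Nat))) ≠ 0 then 'r' else '-'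
      let w : Char := if PySem.Int.band mode ((128 : Int) >>> ((6 - t.1 : Nat))) ≠ 0 then 'w' else '-'
      let xVal := PySem.Int.band mode ((64 : Int) >>> ((6 - t.1 : Nat)))
      let special := PySem.Int.band mode t.2.1
      let x : Char :=
        if special ≠ 0 ∧ xVal ≠ 0 then t.2.2
        else if special ≠ 0 then t.2.2.toUpper
        else if xVal ≠ 0 then 'x'
        else '-'
      acc ++ [r, w, x]) result
  String.ofList result

-- ===== PORT B =====
def format_mode_py_alt (mode : Int) : String :=
  let table : List (Int × Char) :=
    [(256, 'r'), (128, 'w'), (64, 'x'), (32, 'r'), (16, 'w'), (8, 'x'), (4, 'r'), (2, 'w'), (1, 'x')]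
  let perm := table.map (fun p => if PySem.Int.band mode p.1 ≠ 0 then p.2 else '-')
  let perm := (PySem.List.enumerate [((2048 : Int), 's'), (1024, 's'), (512, 't')]).foldl
    (fun pm e =>
      if PySem.Int.band mode e.2.1 ≠ 0 then
        pm.set (3 * e.1 + 2).toNat (if pm.getD (3 * e.1 + 2).toNat ' ' = 'x' then e.2.2 else e.2.2.toUpper)
      else pm) perm
  String.ofList (PySem.Dict.getD pvFtypes (PySem.Int.band mode 61440) '?' :: perm)

-- ===== PRECONDITION & SPEC =====
-- Pre_ excludes negative mode, where Python's stat.S_IFMT raises OverflowError (A returns no value there).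
def Pre_format_mode_py (mode : Int) : Prop := 0 ≤ mode
instance (mode : Int) : Decidable (Pre_format_mode_py mode) := by unfold Pre_format_mode_py; infer_instance
def pvWitness_format_mode_py : Int := (33188)

def Spec_format_mode_py (mode : Int) (out : String) : Prop := out = format_mode_py_alt mode
instance (mode : Int) (out : String) : Decidable (Spec_format_mode_py mode out) := by unfold Spec_format_mode_py; infer_instance

-- ===== CLAIM (what is proved, stated in full; the proofs are below) =====
def Claim_equal_format_mode_py : Prop := ∀ (mode : Int), Dom_format_mode_py mode → Pre_format_mode_py mode → Spec_format_mode_py mode (format_mode_py mode)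

-- ===== LEMMAS AND PROOFS =====

-- ===== VERDICT (by name: the statement is the Claim_ definition above) =====
theorem format_mode_py_spec : Claim_equal_format_mode_py := by
  intro mode _ _
  show _ = format_mode_py_alt mode
  have e1 : (256 : Int) >>> (0 : Nat) = 256 := by decide
  have e2 : (128 : Int) >>> (0 : Nat) = 128 := by decide
  have e3 : (64 : Int) >>> (0 : Nat) = 64 := by decide
  have e4 : (256 : Int) >>> (3 : Nat) = 32 := by decide
  have e5 : (128 : Int) >>> (3 : Nat) = 16 := by decide
  have e6 : (64 : Int) >>> (3 : Nat) = 8 := by decide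
  have e7 : (256 : Int) >>> (6 : Nat) = 4 := by decide
  have e8 : (128 : Int) >>> (6 : Nat) = 2 := by decide
  have e9 : (64 : Int) >>> (6 : Nat) = 1 := by decide
  simp only [format_mode_py, format_mode_py_alt, List.foldl, List.map,
    PySem.List.enumerate_cons, PySem.List.enumerate_nil]
  by_cases h1 : PySem.Int.band mode 2048 ≠ 0 <;>
  by_cases h2 : PySem.Int.band mode 64 ≠ 0 <;>
  by_cases h3 : PySem.Int.band mode 1024 ≠ 0 <;>
  by_cases h4 : PySem.Int.band mode 8 ≠ 0 <;>
  by_cases h5 : PySem.Int.band mode 512 ≠ 0 <;>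
  by_cases h6 : PySem.Int.band mode 1 ≠ 0 <;>
  simp [e1, e2, e3, e4, e5, e6, e7, e8, e9, h1, h2, h3, h4, h5, h6]
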